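-- pv_equiv track=rewrite | github.com/Sheriffy4/intellirefactor | intellirefactor/analysis/decomposition/clustering.py | _has_modal_mix
-- ===== SOURCE A (Python) =====
-- from typing import Dict, List, Set, Tuple, Optional
--
-- def _has_modal_mix(method_names: List[str]) -> bool:
--     modal_prefixes = ["can_", "is_", "has_"]
--
--     for prefix in modal_prefixes:
--         has_modal = any(name.startswith(prefix) for name in method_names)
--         has_non_modal = any(not name.startswith(prefix) for name in method_names)
--         if has_modal and has_non_modal:
--             return True
--
--     return False
-- ===== SOURCE B (Python) =====
-- from typing import List
--
-- def _has_modal_mix(method_names: List[str]) -> bool: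
--     counts = {"can_": 0, "is_": 0, "has_": 0}
--     total = len(method_names)
--     for name in method_names:
--         for prefix in counts:
--             if name.startswith(prefix):
--                 counts[prefix] += 1
--                 break
--     return any(0 < c < total for c in counts.values())
-- ===== Notes on version B (the rewrite author's own statement) =====
-- stated objective: alternative
-- what changed: Instead of looping over the three prefixes and scanning the name list twice per prefix with any(), B makes a single pass over the names building a per-prefix count table (breaking on the first matching prefix, which are mutually disjoint) and then reports a mix iff some prefix count satisfies 0 < count < len(method_names).
import Mathlib
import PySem

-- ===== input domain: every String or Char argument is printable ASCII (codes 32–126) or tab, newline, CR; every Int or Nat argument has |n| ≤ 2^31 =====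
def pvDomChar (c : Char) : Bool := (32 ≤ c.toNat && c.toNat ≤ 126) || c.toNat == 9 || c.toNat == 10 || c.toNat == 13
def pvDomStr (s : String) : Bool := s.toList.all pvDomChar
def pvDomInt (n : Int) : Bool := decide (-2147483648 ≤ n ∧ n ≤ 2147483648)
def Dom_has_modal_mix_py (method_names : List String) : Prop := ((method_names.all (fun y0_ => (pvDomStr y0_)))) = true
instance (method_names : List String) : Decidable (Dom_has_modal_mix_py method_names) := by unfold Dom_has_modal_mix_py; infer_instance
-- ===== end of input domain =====

-- B makes one counting pass over the names instead of A's six scans (two per prefix); objective: alternative decomposition.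

-- ===== PORT A =====
-- A: for each prefix, scan names twice (has_modal / has_non_modal); return True on first mixed prefix.
def hasModalMixGoA (method_names : List String) : List String → Bool
  | [] => false
  | prefix_ :: rest =>
    let has_modal := method_names.any (fun name => PySem.Str.startswith name prefix_)
    let has_non_modal := method_names.any (fun name => !(PySem.Str.startswith name prefix_))
    if has_modal && has_non_modal then true else hasModalMixGoA method_names rest

def has_modal_mix_py (method_names : List String) : Bool :=
  hasModalMixGoA method_names ["can_", "is_", "has_"]

-- ===== PORT B =====
-- inner 'for prefix in counts: if name.startswith(prefix): counts[prefix] += 1; break'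
def hasModalMixInnerB (d : PySem.Dict String Int) (name : String) : List String → PySem.Dict String Int
  | [] => d
  | prefix_ :: rest =>
    if PySem.Str.startswith name prefix_ then d.modify prefix_ 0 (· + 1)
    else hasModalMixInnerB d name rest

def has_modal_mix_py_alt (method_names : List String) : Bool :=
  let counts0 : PySem.Dict String Int := PySem.Dict.ofList [("can_", 0), ("is_", 0), ("has_", 0)]
  let total : Int := method_names.length
  let counts := method_names.foldl (fun d name => hasModalMixInnerB d name ["can_", "is_", "has_"]) counts0
  counts.values.any (fun c => decide (0 < c) && decide (c < total))

-- ===== PRECONDITION & SPEC =====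
def Spec_has_modal_mix_py (method_names : List String) (out : Bool) : Prop := out = has_modal_mix_py_alt method_names
instance (method_names : List String) (out : Bool) : Decidable (Spec_has_modal_mix_py method_names out) := by unfold Spec_has_modal_mix_py; infer_instance

-- ===== CLAIM (what is proved, stated in full; the proofs are below) =====
def Claim_equal_has_modal_mix_py : Prop := ∀ (method_names : List String), Dom_has_modal_mix_py method_names → Spec_has_modal_mix_py method_names (has_modal_mix_py method_names)

-- ===== LEMMAS AND PROOFS =====

-- two string prefixes that differ in their first character are never both prefixes of the same string
theorem pv_prefix_disjoint {cs p q : List Char} {a b : Char}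
    (h : PySem.Chars.startswith cs (a :: p) = true) (hne : a ≠ b) :
    PySem.Chars.startswith cs (b :: q) = false := by
  rw [PySem.Chars.startswith_iff] at h
  obtain ⟨t, ht⟩ := h
  cases hq : PySem.Chars.startswith cs (b :: q) with
  | false => rfl
  | true =>
    rw [PySem.Chars.startswith_iff] at hq
    obtain ⟨u, hu⟩ := hq
    have heq := ht.trans hu.symm
    simp at heq
    exact absurd heq.1 hne

theorem pv_can_is (n : String) (h : PySem.Str.startswith n "can_" = true) :
    PySem.Str.startswith n "is_" = false := by
  simp only [PySem.Str.startswith_eq] at h ⊢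
  exact pv_prefix_disjoint (p := ['a','n','_']) h (by decide)

theorem pv_can_has (n : String) (h : PySem.Str.startswith n "can_" = true) :
    PySem.Str.startswith n "has_" = false := by
  simp only [PySem.Str.startswith_eq] at h ⊢
  exact pv_prefix_disjoint (p := ['a','n','_']) h (by decide)

theorem pv_is_has (n : String) (h : PySem.Str.startswith n "is_" = true) :
    PySem.Str.startswith n "has_" = false := by
  simp only [PySem.Str.startswith_eq] at h ⊢
  exact pv_prefix_disjoint (p := ['s','_']) h (by decide)

-- one inner-loop step of B: the cons equation, then per-branch evaluations
theorem pv_innerB_cons (d : PySem.Dict String Int) (n p : String) (rest : List String) :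
    hasModalMixInnerB d n (p :: rest) =
      if PySem.Str.startswith n p then d.modify p 0 (· + 1) else hasModalMixInnerB d n rest := rfl

theorem pv_step_can (a b c : Int) (n : String) (h : PySem.Str.startswith n "can_" = true) :
    hasModalMixInnerB (PySem.Dict.mk [("can_",a),("is_",b),("has_",c)]) n ["can_","is_","has_"]
      = PySem.Dict.mk [("can_",a+1),("is_",b),("has_",c)] := by
  simp only [pv_innerB_cons, h, if_true]
  rfl

theorem pv_step_is (a b c : Int) (n : String) (h1 : PySem.Str.startswith n "can_" = false)
    (h2 : PySem.Str.startswith n "is_" = true) :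
    hasModalMixInnerB (PySem.Dict.mk [("can_",a),("is_",b),("has_",c)]) n ["can_","is_","has_"]
      = PySem.Dict.mk [("can_",a),("is_",b+1),("has_",c)] := by
  simp only [pv_innerB_cons, h1, h2, Bool.false_eq_true, if_true, if_false]
  rfl

theorem pv_step_has (a b c : Int) (n : String) (h1 : PySem.Str.startswith n "can_" = false)
    (h2 : PySem.Str.startswith n "is_" = false) (h3 : PySem.Str.startswith n "has_" = true) :
    hasModalMixInnerB (PySem.Dict.mk [("can_",a),("is_",b),("has_",c)]) n ["can_","is_","has_"]
      = PySem.Dict.mk [("can_",a),("is_",b),("has_",c+1)] := by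
  simp only [pv_innerB_cons, h1, h2, h3, Bool.false_eq_true, if_true, if_false]
  rfl

theorem pv_step_none (a b c : Int) (n : String) (h1 : PySem.Str.startswith n "can_" = false)
    (h2 : PySem.Str.startswith n "is_" = false) (h3 : PySem.Str.startswith n "has_" = false) :
    hasModalMixInnerB (PySem.Dict.mk [("can_",a),("is_",b),("has_",c)]) n ["can_","is_","has_"]
      = PySem.Dict.mk [("can_",a),("is_",b),("has_",c)] := by
  simp only [pv_innerB_cons, h1, h2, h3, Bool.false_eq_true, if_false]
  rfl

-- the one-pass fold computes, per prefix, the number of names starting with it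
theorem pv_fold_eq (names : List String) (a b c : Int) :
    names.foldl (fun d name => hasModalMixInnerB d name ["can_", "is_", "has_"])
      (PySem.Dict.mk [("can_", a), ("is_", b), ("has_", c)]) =
    PySem.Dict.mk
      [("can_", a + names.countP (fun n => PySem.Str.startswith n "can_")),
       ("is_", b + names.countP (fun n => PySem.Str.startswith n "is_")),
       ("has_", c + names.countP (fun n => PySem.Str.startswith n "has_"))] := by
  induction names generalizing a b c with
  | nil => simp
  | cons n l ih =>
    rw [List.foldl_cons]
    by_cases h1 : PySem.Str.startswith n "can_" = true
    · rw [pv_step_can a b c n h1, ih]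
      simp only [List.countP_cons, h1, pv_can_is n h1, pv_can_has n h1,
        PySem.Dict.mk.injEq, List.cons.injEq, Prod.mk.injEq, and_true, true_and,
        if_true, if_false, Bool.false_eq_true, Nat.cast_add, Nat.cast_one, add_zero]
      omega
    · rw [Bool.not_eq_true] at h1
      by_cases h2 : PySem.Str.startswith n "is_" = true
      · rw [pv_step_is a b c n h1 h2, ih]
        simp only [List.countP_cons, h1, h2, pv_is_has n h2,
          PySem.Dict.mk.injEq, List.cons.injEq, Prod.mk.injEq, and_true, true_and,
          if_true, if_false, Bool.false_eq_true, Nat.cast_add, Nat.cast_one, add_zero]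
        omega
      · rw [Bool.not_eq_true] at h2
        by_cases h3 : PySem.Str.startswith n "has_" = true
        · rw [pv_step_has a b c n h1 h2 h3, ih]
          simp only [List.countP_cons, h1, h2, h3,
            PySem.Dict.mk.injEq, List.cons.injEq, Prod.mk.injEq, and_true, true_and,
            if_true, if_false, Bool.false_eq_true, Nat.cast_add, Nat.cast_one, add_zero]
          omega
        · rw [Bool.not_eq_true] at h3
          rw [pv_step_none a b c n h1 h2 h3, ih]
          simp only [List.countP_cons, h1, h2, h3, Bool.false_eq_true, if_false, add_zero]

-- 'some name starts with p'  =  'the count is positive'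
theorem pv_any_eq_count_pos (names : List String) (p : String) :
    names.any (fun n => PySem.Str.startswith n p) =
      decide (0 < (names.countP (fun n => PySem.Str.startswith n p) : Int)) := by
  cases h : names.any (fun n => PySem.Str.startswith n p) with
  | false =>
    have h0 : names.countP (fun n => PySem.Str.startswith n p) = 0 := by
      rw [List.countP_eq_zero]
      intro x hx
      exact (List.any_eq_false.mp h) x hx
    rw [h0]
    simp
  | true =>
    obtain ⟨x, hx, hfx⟩ := List.any_eq_true.mp h
    have hpos : 0 < names.countP (fun n => PySem.Str.startswith n p) :=
      List.countP_pos_iff.mpr ⟨x, hx, hfx⟩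
    symm
    rw [decide_eq_true_eq]
    exact_mod_cast hpos

-- 'some name does not start with p'  =  'the count is below the length'
theorem pv_any_not_eq_count_lt (names : List String) (p : String) :
    names.any (fun n => !(PySem.Str.startswith n p)) =
      decide ((names.countP (fun n => PySem.Str.startswith n p) : Int) < (names.length : Int)) := by
  have hle := List.countP_le_length (p := fun n => PySem.Str.startswith n p) (l := names)
  cases h : names.any (fun n => !(PySem.Str.startswith n p)) with
  | false =>
    have hlen : names.countP (fun n => PySem.Str.startswith n p) = names.length := by
      rw [List.countP_eq_length]
      intro x hx
      have := (List.any_eq_false.mp h) x hx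
      simpa using this
    rw [hlen]
    simp
  | true =>
    obtain ⟨x, hx, hfx⟩ := List.any_eq_true.mp h
    have hfx' : PySem.Str.startswith x p = false := by simpa using hfx
    have hlt : names.countP (fun n => PySem.Str.startswith n p) < names.length := by
      rcases Nat.lt_or_ge (names.countP (fun n => PySem.Str.startswith n p)) names.length with h' | h'
      · exact h'
      · have hc : PySem.Str.startswith x p = true :=
          (List.countP_eq_length.mp (Nat.le_antisymm hle h')) x hx
        rw [hfx'] at hc
        exact absurd hc (by simp)
    symm
    rw [decide_eq_true_eq]
    exact_mod_cast hlt

-- ===== VERDICT (by name: the statement is the Claim_ definition above) =====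
theorem has_modal_mix_py_spec : Claim_equal_has_modal_mix_py := by
  intro names _
  show has_modal_mix_py names = has_modal_mix_py_alt names
  have hofList : PySem.Dict.ofList [("can_",(0:Int)),("is_",0),("has_",0)]
      = PySem.Dict.mk [("can_",0),("is_",0),("has_",0)] := rfl
  simp only [has_modal_mix_py, has_modal_mix_py_alt, hasModalMixGoA, hofList, pv_fold_eq,
    PySem.Dict.values_mk, zero_add, List.map_cons, List.map_nil, List.any_cons, List.any_nil,
    Bool.or_false, Bool.if_true_left, Bool.decide_coe,
    pv_any_eq_count_pos, pv_any_not_eq_count_lt]
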